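-- pv_equiv track=rewrite | github.com/mjlee76/Algorithm_Python | 2Programmers/Brute Force/모의고사.py | solution
-- ===== SOURCE A (Python) =====
-- def solution(answers):
--     result = []
--     supo1 = [1,2,3,4,5]
--     supo2 = [2,1,2,3,2,4,2,5]
--     supo3 = [3,3,1,1,2,2,4,4,5,5]
--
--     count1 = 0
--     for i in range (len(answers)):
--         k = i % 5
--         if answers[i] == supo1[k]:
--             count1 += 1
--     count2 = 0
--     for i in range (len(answers)):
--         k = i % 8
--         if answers[i] == supo2[k]:
--             count2 += 1
--     count3 = 0
--     for i in range (len(answers)):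
--         k = i % 10
--         if answers[i] == supo3[k]:
--             count3 += 1
--
--     max_count = max(count1,count2,count3)
--     if count1 == max_count:
--         result.append(1)
--     if count2 == max_count:
--         result.append(2)
--     if count3 == max_count:
--         result.append(3)
--
--     return result
-- ===== SOURCE B (Python) =====
-- def solution(answers):
--     # Bucket the answers by (index mod 40, value) into a counter once (40 = lcm of the
--     # pattern lengths); each pattern's score is then a sum over the 40 residue classes,
--     # with no per-element pattern comparison.
--     tally = {}
--     for i, v in enumerate(answers):
--         key = (i % 40, v)
--         tally[key] = tally.get(key, 0) + 1
--
--     def score(supo):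
--         m = len(supo)
--         return sum(tally.get((r, supo[r % m]), 0) for r in range(40))
--
--     c1 = score([1, 2, 3, 4, 5])
--     c2 = score([2, 1, 2, 3, 2, 4, 2, 5])
--     c3 = score([3, 3, 1, 1, 2, 2, 4, 4, 5, 5])
--     best = max(c1, c2, c3)
--     return [k for k, c in ((1, c1), (2, c2), (3, c3)) if c == best]
-- ===== Notes on version B (the rewrite author's own statement) =====
-- stated objective: alternative
-- what changed: B never compares answers against the patterns while scanning: it buckets answers once into a dict counter keyed by (index mod 40, value) (40 = lcm of the pattern lengths), then computes each pattern's score as a sum of 40 counter lookups over the residue classes; A scans answers three times comparing each element to a pattern entry.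
import Mathlib
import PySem

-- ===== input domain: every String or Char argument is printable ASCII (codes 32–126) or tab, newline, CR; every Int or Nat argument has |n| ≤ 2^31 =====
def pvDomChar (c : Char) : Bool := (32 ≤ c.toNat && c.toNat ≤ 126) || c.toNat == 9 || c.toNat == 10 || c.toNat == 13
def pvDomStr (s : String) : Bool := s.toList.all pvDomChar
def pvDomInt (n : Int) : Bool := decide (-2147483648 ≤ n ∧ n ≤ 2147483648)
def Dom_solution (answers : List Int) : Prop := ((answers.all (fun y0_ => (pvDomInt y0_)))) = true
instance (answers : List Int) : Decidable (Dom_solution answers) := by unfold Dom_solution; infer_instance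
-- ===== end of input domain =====

-- B replaces A's three comparison passes by one bucketing pass into a (index mod 40, value)
-- counter dict plus a 40-term lookup sum per pattern (objective: alternative); same return value.

-- ===== PORT A =====
-- answers[i] and supoK[k] are always in range here, so pyGetD with default 0 is exact.
def solution (answers : List Int) : List Int :=
  let supo1 : List Int := [1, 2, 3, 4, 5]
  let supo2 : List Int := [2, 1, 2, 3, 2, 4, 2, 5]
  let supo3 : List Int := [3, 3, 1, 1, 2, 2, 4, 4, 5, 5]
  let count1 : Int := (PySem.List.pyRange 0 (PySem.List.len answers) 1).foldl
    (fun c i => if PySem.List.pyGetD answers i 0 = PySem.List.pyGetD supo1 (PySem.Int.mod i 5) 0 then c + 1 else c) 0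
  let count2 : Int := (PySem.List.pyRange 0 (PySem.List.len answers) 1).foldl
    (fun c i => if PySem.List.pyGetD answers i 0 = PySem.List.pyGetD supo2 (PySem.Int.mod i 8) 0 then c + 1 else c) 0
  let count3 : Int := (PySem.List.pyRange 0 (PySem.List.len answers) 1).foldl
    (fun c i => if PySem.List.pyGetD answers i 0 = PySem.List.pyGetD supo3 (PySem.Int.mod i 10) 0 then c + 1 else c) 0
  let maxCount : Int := max (max count1 count2) count3
  let result : List Int := []
  let result := if count1 = maxCount then result ++ [1] else result
  let result := if count2 = maxCount then result ++ [2] else result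
  let result := if count3 = maxCount then result ++ [3] else result
  result

-- ===== PORT B =====
-- Source B's bucketing loop: for i, v in enumerate(answers): key = (i % 40, v); tally[key] = tally.get(key, 0) + 1
-- (Python's local `key` is inlined; same computation)
def pvTally (answers : List Int) : PySem.Dict (Int × Int) Int :=
  (PySem.List.enumerate answers).foldl
    (fun t p => t.insert (PySem.Int.mod p.1 40, p.2)
      (t.getD (PySem.Int.mod p.1 40, p.2) 0 + 1))
    PySem.Dict.empty

-- Source B's score: sum(tally.get((r, supo[r % m]), 0) for r in range(40)) with m = len(supo)
def pvScore (tally : PySem.Dict (Int × Int) Int) (supo : List Int) : Int :=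
  let m : Int := PySem.List.len supo
  (PySem.List.pyRange 0 40 1).foldl
    (fun acc r => acc + tally.getD (r, PySem.List.pyGetD supo (PySem.Int.mod r m) 0) 0) 0

def solution_alt (answers : List Int) : List Int :=
  let tally := pvTally answers
  let c1 := pvScore tally [1, 2, 3, 4, 5]
  let c2 := pvScore tally [2, 1, 2, 3, 2, 4, 2, 5]
  let c3 := pvScore tally [3, 3, 1, 1, 2, 2, 4, 4, 5, 5]
  let best : Int := max (max c1 c2) c3
  (([(1, c1), (2, c2), (3, c3)] : List (Int × Int)).filter (fun p => p.2 == best)).map Prod.fst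

-- ===== PRECONDITION & SPEC =====
def Spec_solution (answers : List Int) (out : List Int) : Prop := out = solution_alt answers
instance (answers : List Int) (out : List Int) : Decidable (Spec_solution answers out) := by unfold Spec_solution; infer_instance

-- ===== CLAIM (what is proved, stated in full; the proofs are below) =====
def Claim_equal_solution : Prop := ∀ (answers : List Int), Dom_solution answers → Spec_solution answers (solution answers)

-- ===== LEMMAS AND PROOFS =====

-- count of matches of pattern s (period m), scanning the list with running position k
def pvCnt (s : List Int) (m : Int) (k : Nat) : List Int → Int
  | [] => 0
  | v :: rest => (if v = PySem.List.pyGetD s (PySem.Int.mod (k : Int) m) 0 then 1 else 0) + pvCnt s m (k + 1) rest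

-- ---- A-side: each of A's three foldl counts is pvCnt ----
theorem pvAFold_eq (s : List Int) (m : Int) :
    ∀ (rest pre : List Int) (c0 : Int),
      ((List.range' pre.length rest.length 1).foldl
        (fun c (i : Nat) => if (pre ++ rest).getD i 0 = PySem.List.pyGetD s (PySem.Int.mod (i : Int) m) 0
          then c + 1 else c) c0)
      = c0 + pvCnt s m pre.length rest := by
  intro rest
  induction rest with
  | nil => intro pre c0; simp [pvCnt]
  | cons v rest' ih =>
    intro pre c0
    rw [List.length_cons, List.range'_succ, List.foldl_cons]
    have hget : (pre ++ v :: rest').getD pre.length 0 = v := by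
      simp [List.getD]
    rw [hget]
    have := ih (pre ++ [v]) (if v = PySem.List.pyGetD s (PySem.Int.mod (pre.length : Int) m) 0 then c0 + 1 else c0)
    simp only [List.length_append, List.length_cons, List.length_nil, List.append_assoc,
      List.singleton_append] at this
    rw [this]
    simp only [pvCnt]
    split_ifs <;> ring

theorem pvCount_eq (ans s : List Int) (m : Int) :
    ((PySem.List.pyRange 0 (PySem.List.len ans) 1).foldl
      (fun c i => if PySem.List.pyGetD ans i 0 = PySem.List.pyGetD s (PySem.Int.mod i m) 0 then c + 1 else c) 0)
    = pvCnt s m 0 ans := by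
  rw [PySem.List.len_eq, PySem.List.pyRange_zero_natCast, List.foldl_map]
  have h := pvAFold_eq s m ans [] 0
  simp only [List.length_nil, List.nil_append, zero_add] at h
  rw [← h, List.range_eq_range']
  simp [PySem.List.pyGetD_natCast]

-- ---- B-side ----

-- the key list the bucketing loop runs over, with a generalized start index
def pvKeys (k : Nat) : List Int → List (Int × Int)
  | [] => []
  | v :: rest => (PySem.Int.mod (k : Int) 40, v) :: pvKeys (k + 1) rest

theorem pvKeys_eq (ans : List Int) : ∀ (k : Nat),
    (PySem.List.enumerate ans (k : Int)).map (fun p => ((PySem.Int.mod p.1 40, p.2) : Int × Int))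
      = pvKeys k ans := by
  induction ans with
  | nil => intro k; simp [PySem.List.enumerate_nil, pvKeys]
  | cons v rest ih =>
    intro k
    have hc : (k : Int) + 1 = ((k + 1 : Nat) : Int) := by push_cast; ring
    simp only [PySem.List.enumerate_cons, List.map_cons, pvKeys, hc, ih]

theorem pvTally_getD (ans : List Int) (key : Int × Int) :
    (pvTally ans).getD key 0 = ((pvKeys 0 ans).count key : Int) := by
  have hmap : (((PySem.List.enumerate ans ((0 : Nat) : Int)).map
        (fun p => ((PySem.Int.mod p.1 40, p.2) : Int × Int))).foldl
        (fun (t : PySem.Dict (Int × Int) Int) k => t.insert k (t.getD k 0 + 1)) PySem.Dict.empty)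
      = pvTally ans := by
    rw [List.foldl_map]; rfl
  rw [← hmap, pvKeys_eq ans 0, PySem.Dict.getD_foldl_insert_add_one, PySem.Dict.getD_empty]
  ring

-- sum over a Nodup list of a function vanishing off one member
theorem pvSum_map_single {α : Type} [DecidableEq α] :
    ∀ (l : List α), l.Nodup → ∀ (a : α), a ∈ l → ∀ (f : α → Int),
      (∀ x ∈ l, x ≠ a → f x = 0) → (l.map f).sum = f a := by
  intro l
  induction l with
  | nil => intro _ a ha; simp at ha
  | cons x xs ih =>
    intro hnd a ha f hz
    rcases List.nodup_cons.mp hnd with ⟨hx, hxs⟩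
    rcases List.mem_cons.mp ha with rfl | hmem
    · have : ∀ y ∈ xs, f y = 0 := fun y hy => hz y (List.mem_cons_of_mem _ hy) (fun h => hx (h ▸ hy))
      have hsum : (xs.map f).sum = 0 := by
        apply List.sum_eq_zero; intro z hz'
        rcases List.mem_map.mp hz' with ⟨y, hy, rfl⟩; exact this y hy
      simp [hsum]
    · have hfx : f x = 0 := hz x (List.mem_cons_self) (fun h => hx (h ▸ hmem))
      simp [hfx, ih hxs a hmem f (fun y hy => hz y (List.mem_cons_of_mem _ hy))]

theorem pvInd_sum (g : Int → Int) (r0 : Int) (h0 : 0 ≤ r0) (h40 : r0 < 40) (v : Int) :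
    ((PySem.List.pyRange 0 40 1).map
      (fun r => if ((r0, v) : Int × Int) = (r, g r) then (1 : Int) else 0)).sum
      = if v = g r0 then 1 else 0 := by
  have hmem : r0 ∈ PySem.List.pyRange 0 40 1 := by
    rw [PySem.List.mem_pyRange_one]; exact ⟨h0, h40⟩
  have hz : ∀ x ∈ PySem.List.pyRange 0 40 1, x ≠ r0 →
      (if ((r0, v) : Int × Int) = (x, g x) then (1 : Int) else 0) = 0 := by
    intro x _ hxne
    have : ¬ ((r0, v) : Int × Int) = (x, g x) := by
      intro h
      have hx : r0 = x := congrArg Prod.fst h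
      exact hxne hx.symm
    simp [this]
  rw [pvSum_map_single _ (PySem.List.nodup_pyRange_one 0 40) r0 hmem _ hz]
  by_cases h : v = g r0 <;> simp [Prod.ext_iff, h]

-- per-pattern main lemma: the 40-bucket lookup sum equals the direct match count
theorem pvScoreCnt (s : List Int) (M : Nat) (hM : 0 < M) (hdvd : (M : Int) ∣ 40) :
    ∀ (ans : List Int) (k : Nat),
      ((PySem.List.pyRange 0 40 1).map
        (fun r => ((pvKeys k ans).count (r, PySem.List.pyGetD s (PySem.Int.mod r (M : Int)) 0) : Int))).sum
      = pvCnt s (M : Int) k ans := by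
  intro ans
  induction ans with
  | nil => intro k; simp [pvKeys, pvCnt]
  | cons v rest ih =>
    intro k
    simp only [pvKeys, pvCnt]
    have hsplit : ∀ r : Int,
        (((((PySem.Int.mod (k : Int) 40, v)) :: pvKeys (k + 1) rest).count
            (r, PySem.List.pyGetD s (PySem.Int.mod r (M : Int)) 0) : Int))
        = ((pvKeys (k + 1) rest).count (r, PySem.List.pyGetD s (PySem.Int.mod r (M : Int)) 0) : Int)
          + (if ((PySem.Int.mod (k : Int) 40, v) : Int × Int)
              = (r, PySem.List.pyGetD s (PySem.Int.mod r (M : Int)) 0) then 1 else 0) := by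
      intro r
      rw [List.count_cons]
      split_ifs with hb h h
      · push_cast; ring
      · exact absurd (beq_iff_eq.mp hb).symm (fun he => h he.symm)
      · exact absurd (beq_iff_eq.mpr h) hb
      · push_cast; ring
    calc ((PySem.List.pyRange 0 40 1).map
            (fun r => (((((PySem.Int.mod (k : Int) 40, v)) :: pvKeys (k + 1) rest).count
              (r, PySem.List.pyGetD s (PySem.Int.mod r (M : Int)) 0) : Int)))).sum
        = ((PySem.List.pyRange 0 40 1).map
            (fun r => ((pvKeys (k + 1) rest).count (r, PySem.List.pyGetD s (PySem.Int.mod r (M : Int)) 0) : Int)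
              + (if ((PySem.Int.mod (k : Int) 40, v) : Int × Int)
                  = (r, PySem.List.pyGetD s (PySem.Int.mod r (M : Int)) 0) then 1 else 0))).sum := by
            exact congrArg List.sum (List.map_congr_left (fun r _ => hsplit r))
      _ = ((PySem.List.pyRange 0 40 1).map
            (fun r => ((pvKeys (k + 1) rest).count (r, PySem.List.pyGetD s (PySem.Int.mod r (M : Int)) 0) : Int))).sum
          + ((PySem.List.pyRange 0 40 1).map
            (fun r => (if ((PySem.Int.mod (k : Int) 40, v) : Int × Int)
                = (r, PySem.List.pyGetD s (PySem.Int.mod r (M : Int)) 0) then (1 : Int) else 0))).sum := by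
            rw [PySem.List.sum_map_add_int]
      _ = pvCnt s (M : Int) (k + 1) rest
          + (if v = PySem.List.pyGetD s (PySem.Int.mod (PySem.Int.mod (k : Int) 40) (M : Int)) 0 then 1 else 0) := by
            rw [ih (k + 1), pvInd_sum _ _ (PySem.Int.mod_nonneg _ (by norm_num)) (PySem.Int.mod_lt _ (by norm_num)) v]
      _ = (if v = PySem.List.pyGetD s (PySem.Int.mod (k : Int) (M : Int)) 0 then 1 else 0)
          + pvCnt s (M : Int) (k + 1) rest := by
            have hmm : PySem.Int.mod (PySem.Int.mod (k : Int) 40) (M : Int) = PySem.Int.mod (k : Int) (M : Int) := by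
              have hMpos : (0 : Int) < (M : Int) := by exact_mod_cast hM
              rw [PySem.Int.mod_eq_emod_of_pos (by norm_num : (0:Int) < 40),
                PySem.Int.mod_eq_emod_of_pos hMpos, PySem.Int.mod_eq_emod_of_pos hMpos,
                Int.emod_emod_of_dvd _ hdvd]
            rw [hmm]; ring

theorem pvScore_eq (ans s : List Int) (M : Nat) (hM : 0 < M) (hlen : s.length = M)
    (hdvd : (M : Int) ∣ 40) :
    pvScore (pvTally ans) s = pvCnt s (M : Int) 0 ans := by
  unfold pvScore
  rw [PySem.List.foldl_add]
  have hlen' : PySem.List.len s = (M : Int) := by rw [PySem.List.len_eq, hlen]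
  rw [hlen']
  have hmap : ((PySem.List.pyRange 0 40 1).map
      (fun r => (pvTally ans).getD (r, PySem.List.pyGetD s (PySem.Int.mod r (M : Int)) 0) 0))
      = ((PySem.List.pyRange 0 40 1).map
      (fun r => ((pvKeys 0 ans).count (r, PySem.List.pyGetD s (PySem.Int.mod r (M : Int)) 0) : Int))) := by
    exact List.map_congr_left (fun r _ => pvTally_getD ans _)
  rw [hmap, pvScoreCnt s M hM hdvd ans 0]
  ring

-- the shared winner-selection step, over arbitrary counts
theorem pvPick (c1 c2 c3 : Int) :
    (let maxCount := max (max c1 c2) c3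
     let result : List Int := []
     let result := if c1 = maxCount then result ++ [1] else result
     let result := if c2 = maxCount then result ++ [2] else result
     let result := if c3 = maxCount then result ++ [3] else result
     result)
    = (let best := max (max c1 c2) c3
       (([(1, c1), (2, c2), (3, c3)] : List (Int × Int)).filter (fun p => p.2 == best)).map Prod.fst) := by
  simp only [List.filter_cons, List.filter_nil, beq_iff_eq]
  split_ifs <;> simp

-- ===== VERDICT (by name: the statement is the Claim_ definition above) =====
theorem solution_spec : Claim_equal_solution := by
  intro answers _
  unfold Spec_solution
  simp only [solution, solution_alt]
  rw [pvCount_eq answers [1, 2, 3, 4, 5] 5, pvCount_eq answers [2, 1, 2, 3, 2, 4, 2, 5] 8,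
    pvCount_eq answers [3, 3, 1, 1, 2, 2, 4, 4, 5, 5] 10,
    pvScore_eq answers [1, 2, 3, 4, 5] 5 (by norm_num) rfl (by norm_num),
    pvScore_eq answers [2, 1, 2, 3, 2, 4, 2, 5] 8 (by norm_num) rfl (by norm_num),
    pvScore_eq answers [3, 3, 1, 1, 2, 2, 4, 4, 5, 5] 10 (by norm_num) rfl (by norm_num)]
  exact pvPick _ _ _
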